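-- pv_equiv track=rewrite | github.com/IdanShp/PM_preprocess | steps.py | get_zone_by_point
-- ===== SOURCE A (Python) =====
-- def get_zone_by_point(point, zones, split_x_to, split_y_to):
--     x, y = point
--     seg_x = 0
--     seg_y = 0
--     for i, segment_len in enumerate(split_x_to):
--         seg_x += segment_len
--         if y < seg_x:
--             break
--
--     for j, segment_len in enumerate(split_y_to):
--         seg_y += segment_len
--         if x < seg_y:
--             break
--     zone = zones[j][i]
--     return zone
-- ===== SOURCE B (Python) =====
-- def get_zone_by_point(point, zones, split_x_to, split_y_to):
--     x, y = point
--     i = min([k for k in range(len(split_x_to)) if y < sum(split_x_to[:k + 1])],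
--             default=len(split_x_to) - 1)
--     j = min([k for k in range(len(split_y_to)) if x < sum(split_y_to[:k + 1])],
--             default=len(split_y_to) - 1)
--     return zones[j][i]
-- ===== Notes on version B (the rewrite author's own statement) =====
-- stated objective: alternative
-- what changed: B replaces A's two stateful running-sum break loops (whose leftover loop variable does the clamping) by a global characterisation: the zone index is the minimum k whose prefix-slice sum sum(splits[:k+1]) exceeds the coordinate, computed as min over a list comprehension with a default clamp; no accumulator, no break.
import Mathlib
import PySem

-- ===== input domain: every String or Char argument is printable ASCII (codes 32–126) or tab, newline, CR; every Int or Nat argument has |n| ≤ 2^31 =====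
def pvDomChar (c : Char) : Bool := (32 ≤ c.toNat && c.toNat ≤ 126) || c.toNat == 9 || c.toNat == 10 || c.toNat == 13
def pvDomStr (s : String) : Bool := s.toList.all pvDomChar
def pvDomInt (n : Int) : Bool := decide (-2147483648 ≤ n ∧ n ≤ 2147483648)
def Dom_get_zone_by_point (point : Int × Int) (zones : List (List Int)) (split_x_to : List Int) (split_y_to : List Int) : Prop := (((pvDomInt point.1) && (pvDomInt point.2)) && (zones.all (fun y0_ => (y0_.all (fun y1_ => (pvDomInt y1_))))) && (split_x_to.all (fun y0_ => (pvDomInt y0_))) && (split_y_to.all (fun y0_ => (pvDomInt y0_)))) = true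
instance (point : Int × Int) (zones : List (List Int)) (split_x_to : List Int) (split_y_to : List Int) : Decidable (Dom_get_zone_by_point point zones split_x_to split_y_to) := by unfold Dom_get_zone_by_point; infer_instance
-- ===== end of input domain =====

-- B replaces A's two running-sum break loops by a global characterisation: the zone index is the
-- minimum k whose prefix-slice sum sum(splits[:k+1]) exceeds the coordinate (min over a list
-- comprehension, default clamp len-1); objective: alternative formulation, same result.

-- ===== PORT A =====
-- A's for/break loop: running sum seg, enumerate index k; if the loop finishes without a break
-- the leftover loop variable is the last index (k - 1 when we have walked past the end).
def pvAScan (v : Int) (seg : Int) (k : Nat) : List Int → Nat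
  | [] => k - 1
  | s :: rest => if v < seg + s then k else pvAScan v (seg + s) (k + 1) rest

def get_zone_by_point (point : Int × Int) (zones : List (List Int)) (split_x_to : List Int) (split_y_to : List Int) : Int :=
  let x := point.1
  let y := point.2
  let i := pvAScan y 0 0 split_x_to
  let j := pvAScan x 0 0 split_y_to
  -- zones[j][i]: Python raises IndexError out of range (j, i ≥ 0 so no negative wrap); excluded by Pre_
  (PySem.List.pyGet? ((PySem.List.pyGet? zones (j : Int)).getD []) (i : Int)).getD 0

-- ===== PORT B =====
-- Source B: min([k for k in range(len(splits)) if v < sum(splits[:k+1])], default=len(splits)-1)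
-- range(len) → pyRange, splits[:k+1] → slice, min(..., default=...) → PySem.List.minD
def pvBIdx (v : Int) (splits : List Int) : Int :=
  PySem.List.minD
    ((PySem.List.pyRange 0 (splits.length : Int) 1).filter
      (fun k => decide (v < (PySem.List.slice splits none (some (k + 1))).sum)))
    (fun k => k) ((splits.length : Int) - 1)

def get_zone_by_point_alt (point : Int × Int) (zones : List (List Int)) (split_x_to : List Int) (split_y_to : List Int) : Int :=
  -- zones[j][i] with j = min-index for x over split_y_to, i = min-index for y over split_x_to
  (PySem.List.pyGet? ((PySem.List.pyGet? zones (pvBIdx point.1 split_y_to)).getD [])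
      (pvBIdx point.2 split_x_to)).getD 0

-- ===== PRECONDITION & SPEC =====
-- Pre_ is exactly where Python A returns: both split lists nonempty (else UnboundLocalError) and
-- the selected cell zones[j][i] in range (else IndexError); i, j are characterised declaratively as
-- the first cumulative stop the coordinate falls before, clamped to the last index.
def Pre_get_zone_by_point (point : Int × Int) (zones : List (List Int)) (split_x_to : List Int) (split_y_to : List Int) : Prop :=
  split_x_to ≠ [] ∧ split_y_to ≠ [] ∧
  (let i := min (((split_x_to.scanl (· + ·) 0).tail).findIdx (fun p => point.2 < p)) (split_x_to.length - 1)
   let j := min (((split_y_to.scanl (· + ·) 0).tail).findIdx (fun p => point.1 < p)) (split_y_to.length - 1)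
   j < zones.length ∧ i < (zones.getD j []).length)

instance (point : Int × Int) (zones : List (List Int)) (split_x_to : List Int) (split_y_to : List Int) : Decidable (Pre_get_zone_by_point point zones split_x_to split_y_to) := by unfold Pre_get_zone_by_point; infer_instance

def pvWitness_get_zone_by_point : (Int × Int) × List (List Int) × List Int × List Int := ((0, 0), [[7]], [1], [1])

def Spec_get_zone_by_point (point : Int × Int) (zones : List (List Int)) (split_x_to : List Int) (split_y_to : List Int) (out : Int) : Prop := out = get_zone_by_point_alt point zones split_x_to split_y_to
instance (point : Int × Int) (zones : List (List Int)) (split_x_to : List Int) (split_y_to : List Int) (out : Int) : Decidable (Spec_get_zone_by_point point zones split_x_to split_y_to out) := by unfold Spec_get_zone_by_point; infer_instance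

-- ===== CLAIM (what is proved, stated in full; the proofs are below) =====
def Claim_equal_get_zone_by_point : Prop := ∀ (point : Int × Int) (zones : List (List Int)) (split_x_to : List Int) (split_y_to : List Int), Dom_get_zone_by_point point zones split_x_to split_y_to → Pre_get_zone_by_point point zones split_x_to split_y_to → Spec_get_zone_by_point point zones split_x_to split_y_to (get_zone_by_point point zones split_x_to split_y_to)

-- ===== LEMMAS AND PROOFS =====

theorem pvFoldlMin_eq_self {x : Int} {t : List Int} (h : ∀ y ∈ t, x ≤ y) :
    t.foldl min x = x := by
  rcases PySem.List.foldl_min_mem t x with h1 | h1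
  · exact h1
  · exact le_antisymm (PySem.List.foldl_min_le t x).1 (h _ h1)

theorem pvBIdx_eq_head (v : Int) (l : List Int) :
    pvBIdx v l =
      ((((List.range l.length).filter
          (fun m => decide (v < (l.take (m + 1)).sum))).head?).map
        (fun m => ((m : Nat) : Int))).getD ((l.length : Int) - 1) := by
  rw [pvBIdx, PySem.List.pyRange_zero_nat, List.filter_map]
  have hfun : ((fun k : Int => decide (v < (PySem.List.slice l none (some (k + 1))).sum))
        ∘ (fun m : Nat => (m : Int)))
      = fun m : Nat => decide (v < (l.take (m + 1)).sum) := by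
    funext m
    have hc : ((m : Nat) : Int) + 1 = (((m + 1 : Nat) : Int)) := by push_cast; ring
    simp only [Function.comp_apply, hc, PySem.List.slice_to_natCast]
  rw [hfun]
  cases hf : (List.range l.length).filter (fun m => decide (v < (l.take (m + 1)).sum)) with
  | nil => simp [PySem.List.minD, PySem.List.min?]
  | cons m rest =>
    have hpw : (m :: rest).Pairwise (fun a b : Nat => a < b) := by
      rw [← hf]; exact (List.pairwise_lt_range).filter _
    have hpw2 : ∀ y ∈ rest.map (fun n : Nat => (n : Int)), ((m : Nat) : Int) ≤ y := by
      intro y hy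
      rcases List.mem_map.mp hy with ⟨n, hn, rfl⟩
      exact_mod_cast le_of_lt ((List.pairwise_cons.mp hpw).1 n hn)
    simp only [List.map_cons, PySem.List.minD, PySem.List.min?_id_cons,
      pvFoldlMin_eq_self hpw2, Option.getD_some, List.head?_cons, Option.map_some]

theorem pvAScan_eq_head (l : List Int) : ∀ (v seg : Int) (k : Nat), l ≠ [] →
    pvAScan v seg k l =
      k + ((((List.range l.length).filter
          (fun m => decide (v < seg + (l.take (m + 1)).sum))).head?).getD (l.length - 1)) := by
  induction l with
  | nil => intro v seg k h; exact absurd rfl h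
  | cons s rest ih =>
    intro v seg k _
    have hrange : List.range (s :: rest).length
        = 0 :: (List.range rest.length).map Nat.succ := by
      simp [List.range_succ_eq_map]
    by_cases h : v < seg + s
    · have h0 : (fun m => decide (v < seg + ((s :: rest).take (m + 1)).sum)) 0 = true := by
        simp [h]
      rw [pvAScan, if_pos h, hrange,
        List.filter_cons_of_pos (p := fun m => decide (v < seg + ((s :: rest).take (m + 1)).sum)) h0]
      simp
    · rw [pvAScan, if_neg h, hrange,
        List.filter_cons_of_neg
          (p := fun m => decide (v < seg + ((s :: rest).take (m + 1)).sum)) (by simp [h]),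
        List.filter_map]
      have hfun2 : ((fun m => decide (v < seg + ((s :: rest).take (m + 1)).sum)) ∘ Nat.succ)
          = fun m : Nat => decide (v < (seg + s) + (rest.take (m + 1)).sum) := by
        funext m
        have ha : seg + (s + (rest.take (m + 1)).sum) = (seg + s) + (rest.take (m + 1)).sum := by
          ring
        simp only [Function.comp_apply, Nat.succ_eq_add_one, List.take_succ_cons,
          List.sum_cons, ha]
      cases hrest : rest with
      | nil => simp [pvAScan]
      | cons t rr =>
        rw [← hrest, hfun2, ih v (seg + s) (k + 1) (by simp [hrest])]
        have hlen : 1 ≤ rest.length := by simp [hrest]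
        cases hft : (List.range rest.length).filter
            (fun m => decide (v < (seg + s) + (rest.take (m + 1)).sum)) with
        | nil => simp; omega
        | cons m mm => simp; omega

theorem pvAScan_eq_pvBIdx (v : Int) (l : List Int) (h : l ≠ []) :
    ((pvAScan v 0 0 l : Nat) : Int) = pvBIdx v l := by
  rw [pvBIdx_eq_head, pvAScan_eq_head l v 0 0 h]
  have hlen : 1 ≤ l.length := List.length_pos_iff.mpr h
  have hz : (fun m => decide (v < 0 + (l.take (m + 1)).sum))
      = (fun m : Nat => decide (v < (l.take (m + 1)).sum)) := by
    funext m; rw [zero_add]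
  rw [hz]
  cases hf : (List.range l.length).filter (fun m => decide (v < (l.take (m + 1)).sum)) with
  | nil => simp; omega
  | cons m rest => simp

-- ===== VERDICT (by name: the statement is the Claim_ definition above) =====
theorem get_zone_by_point_spec : Claim_equal_get_zone_by_point := by
  intro point zones sx sy _ hpre
  obtain ⟨hx, hy, _⟩ := hpre
  simp only [Spec_get_zone_by_point, get_zone_by_point, get_zone_by_point_alt,
    pvAScan_eq_pvBIdx _ _ hx, pvAScan_eq_pvBIdx _ _ hy]
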